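-- pv_equiv track=rewrite | github.com/Ryumkin/algorithms_part1 | week4/edist.py | edistance_substring
-- ===== SOURCE A (Python) =====
-- def edistance_substring(A, B):
--     n = len(A)
--     m = len(B)
--     tbl = [[0 for о in range(m + 1)] for i in range(n + 1)]
--
--     for i in range(n + 1):
--         for j in range(m + 1):
--             if i == 0:
--                 tbl[i][j] = j
--                 continue
--             if j == 0:
--                 tbl[i][j] = 0
--                 continue
--             if A[i - 1] == B[j - 1]:
--                 tbl[i][j] = tbl[i - 1][j - 1]
--             else:
--                 tbl[i][j] = min(tbl[i - 1][j],
--                                 tbl[i][j - 1],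
--                                 tbl[i - 1][j - 1]) + 1
--     return tbl[-1][-1]
-- ===== SOURCE B (Python) =====
-- def edistance_substring(A, B):
--     cache = {}
--
--     def f(i, j):
--         if (i, j) in cache:
--             return cache[(i, j)]
--         if j == 0:
--             v = 0
--         elif i == 0:
--             v = j
--         elif A[i - 1] == B[j - 1]:
--             v = f(i - 1, j - 1)
--         else:
--             v = 1 + min(f(i - 1, j), f(i, j - 1), f(i - 1, j - 1))
--         cache[(i, j)] = v
--         return v
--
--     return f(len(A), len(B))
-- ===== Notes on version B (the rewrite author's own statement) =====
-- stated objective: alternative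
-- what changed: Replaces the bottom-up (n+1)x(m+1) table filled by nested index loops with demand-driven top-down memoized recursion f(i,j) over a dict cache; only the cells the recurrence actually reaches are computed.
import Mathlib
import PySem

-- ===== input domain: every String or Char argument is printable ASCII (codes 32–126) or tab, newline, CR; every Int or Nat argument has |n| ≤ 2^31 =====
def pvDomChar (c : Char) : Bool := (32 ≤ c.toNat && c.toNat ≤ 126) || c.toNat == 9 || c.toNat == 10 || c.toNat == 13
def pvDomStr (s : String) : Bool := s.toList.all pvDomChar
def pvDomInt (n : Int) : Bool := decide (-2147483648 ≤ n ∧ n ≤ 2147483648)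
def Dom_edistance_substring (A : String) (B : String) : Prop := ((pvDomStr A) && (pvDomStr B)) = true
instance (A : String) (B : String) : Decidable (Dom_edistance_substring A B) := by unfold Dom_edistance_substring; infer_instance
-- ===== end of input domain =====

-- B replaces A's bottom-up (n+1)x(m+1) table, filled by nested index loops, with
-- demand-driven top-down memoized recursion f(i,j) over a dict cache (same recurrence,
-- a recursive decomposition instead of the table fill).

-- ===== PORT A =====
-- tbl[i][j] read (always in range where A reads it)
def pvGetCell (tbl : List (List Int)) (i j : Nat) : Int := (tbl.getD i []).getD j 0
-- tbl[i][j] = v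
def pvSetCell (tbl : List (List Int)) (i j : Nat) (v : Int) : List (List Int) :=
  tbl.set i ((tbl.getD i []).set j v)

-- the body of A's nested loops, branch for branch
def pvInner (La Lb : List Char) (i : Nat) (tbl : List (List Int)) (j : Nat) : List (List Int) :=
  if i = 0 then pvSetCell tbl i j (j : Int)
  else if j = 0 then pvSetCell tbl i j 0
  else if La.getD (i-1) ' ' = Lb.getD (j-1) ' ' then
    pvSetCell tbl i j (pvGetCell tbl (i-1) (j-1))
  else
    pvSetCell tbl i j (min (min (pvGetCell tbl (i-1) j) (pvGetCell tbl i (j-1)))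
      (pvGetCell tbl (i-1) (j-1)) + 1)

def edistance_substring (A : String) (B : String) : Int :=
  let La := A.toList
  let Lb := B.toList
  let n := La.length
  let m := Lb.length
  let tbl0 := List.replicate (n+1) (List.replicate (m+1) (0:Int))
  let tbl := (List.range (n+1)).foldl
    (fun t i => (List.range (m+1)).foldl (pvInner La Lb i) t) tbl0
  -- tbl[-1][-1]: last row, last entry
  let last := tbl.getD (tbl.length - 1) []
  last.getD (last.length - 1) 0

-- ===== PORT B =====
-- Source B's nested helper f(i, j): check the cache, compute by the recurrence
-- (threading the cache through the three recursive calls left to right, as Python's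
-- mutation order does), store the result under (i, j), return it.
def pvF (La Lb : List Char) (i j : Nat) (cache : PySem.Dict (Nat × Nat) Int) :
    Int × PySem.Dict (Nat × Nat) Int :=
  match cache.get? (i, j) with
  | some v => (v, cache)
  | none =>
    let r : Int × PySem.Dict (Nat × Nat) Int :=
      if _hj : j = 0 then ((0 : Int), cache)
      else if _hi : i = 0 then ((j : Int), cache)
      else if La.getD (i-1) ' ' = Lb.getD (j-1) ' ' then pvF La Lb (i-1) (j-1) cache
      else
        let r1 := pvF La Lb (i-1) j cache
        let r2 := pvF La Lb i (j-1) r1.2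
        let r3 := pvF La Lb (i-1) (j-1) r2.2
        (1 + min (min r1.1 r2.1) r3.1, r3.2)
    (r.1, r.2.insert (i, j) r.1)
termination_by (i, j)
decreasing_by all_goals omega

def edistance_substring_alt (A : String) (B : String) : Int :=
  (pvF A.toList B.toList A.toList.length B.toList.length PySem.Dict.empty).1

-- ===== PRECONDITION & SPEC =====
def Spec_edistance_substring (A : String) (B : String) (out : Int) : Prop := out = edistance_substring_alt A B
instance (A : String) (B : String) (out : Int) : Decidable (Spec_edistance_substring A B out) := by unfold Spec_edistance_substring; infer_instance

-- ===== CLAIM (what is proved, stated in full; the proofs are below) =====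
def Claim_equal_edistance_substring : Prop := ∀ (A : String) (B : String), Dom_edistance_substring A B → Spec_edistance_substring A B (edistance_substring A B)

-- ===== LEMMAS AND PROOFS =====

-- the common recurrence both programs compute
def pvE (La Lb : List Char) : Nat → Nat → Int
  | 0, j => (j : Int)
  | _+1, 0 => 0
  | i+1, j+1 =>
    if La.getD i ' ' = Lb.getD j ' ' then pvE La Lb i j
    else min (min (pvE La Lb i (j+1)) (pvE La Lb (i+1) j)) (pvE La Lb i j) + 1
termination_by i j => (i, j)

theorem pvE_zero (La Lb : List Char) (j : Nat) : pvE La Lb 0 j = (j : Int) := by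
  cases j <;> simp [pvE]

theorem pvE_succ_zero (La Lb : List Char) (i : Nat) : pvE La Lb (i+1) 0 = 0 := by simp [pvE]

theorem pvE_succ_succ (La Lb : List Char) (i j : Nat) :
    pvE La Lb (i+1) (j+1) =
    if La.getD i ' ' = Lb.getD j ' ' then pvE La Lb i j
    else min (min (pvE La Lb i (j+1)) (pvE La Lb (i+1) j)) (pvE La Lb i j) + 1 := by
  simp [pvE]

theorem pvE_zero_of_zero (La Lb : List Char) (i : Nat) : pvE La Lb i 0 = 0 ∨ i = 0 := by
  cases i with
  | zero => exact Or.inr rfl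
  | succ i => exact Or.inl (pvE_succ_zero La Lb i)

-- ---------- B side: the memoized recursion computes pvE ----------

-- cache invariant: every stored value is the recurrence's value at its key
def pvInv (La Lb : List Char) (c : PySem.Dict (Nat × Nat) Int) : Prop :=
  ∀ i j v, c.get? (i, j) = some v → v = pvE La Lb i j

theorem pvInv_empty (La Lb : List Char) : pvInv La Lb PySem.Dict.empty := by
  intro i j v h
  simp [PySem.Dict.get?_empty] at h

theorem pvInv_insert (La Lb : List Char) (c : PySem.Dict (Nat × Nat) Int) (i j : Nat) (v : Int)
    (hc : pvInv La Lb c) (hv : v = pvE La Lb i j) :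
    pvInv La Lb (c.insert (i, j) v) := by
  intro i' j' w h
  rw [PySem.Dict.get?_insert] at h
  split at h
  · next heq =>
    cases h
    obtain ⟨h1, h2⟩ := Prod.mk.injEq .. ▸ heq
    simp only [Prod.mk.injEq] at heq
    rw [heq.1, heq.2, ← hv]
  · exact hc i' j' w h

-- f(i,j) returns pvE(i,j) from any cache satisfying the invariant, and preserves it
theorem pvF_spec (La Lb : List Char) :
    ∀ i j (c : PySem.Dict (Nat × Nat) Int), pvInv La Lb c →
      (pvF La Lb i j c).1 = pvE La Lb i j ∧ pvInv La Lb (pvF La Lb i j c).2 := by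
  intro i
  induction i using Nat.strong_induction_on with
  | _ i ihi =>
    intro j
    induction j using Nat.strong_induction_on with
    | _ j ihj =>
      intro c hc
      rw [pvF]
      cases hget : c.get? (i, j) with
      | some v =>
        exact ⟨hc i j v hget, hc⟩
      | none =>
        simp only []
        by_cases hj : j = 0
        · subst hj
          rcases pvE_zero_of_zero La Lb i with h0 | h0
          · exact ⟨h0.symm, pvInv_insert La Lb c i 0 0 hc h0.symm⟩
          · subst h0
            have : pvE La Lb 0 0 = 0 := by rw [pvE_zero]; rfl
            exact ⟨this.symm, pvInv_insert La Lb c 0 0 0 hc this.symm⟩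
        · simp only [dif_neg hj]
          by_cases hi : i = 0
          · subst hi
            have : pvE La Lb 0 j = (j : Int) := pvE_zero La Lb j
            exact ⟨this.symm, pvInv_insert La Lb c 0 j (j : Int) hc this.symm⟩
          · simp only [dif_neg hi]
            obtain ⟨i', rfl⟩ : ∃ i', i = i' + 1 := ⟨i - 1, by omega⟩
            obtain ⟨j', rfl⟩ : ∃ j', j = j' + 1 := ⟨j - 1, by omega⟩
            simp only [Nat.add_sub_cancel]
            by_cases hch : La.getD i' ' ' = Lb.getD j' ' '
            · simp only [if_pos hch]
              have h1 := ihi i' (by omega) j' c hc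
              have hv : (pvF La Lb i' j' c).1 = pvE La Lb (i'+1) (j'+1) := by
                rw [h1.1, pvE_succ_succ, if_pos hch]
              exact ⟨hv, pvInv_insert La Lb _ _ _ _ h1.2 hv⟩
            · simp only [if_neg hch]
              have h1 := ihi i' (by omega) (j'+1) c hc
              have h2 := ihj j' (by omega) (pvF La Lb i' (j'+1) c).2 h1.2
              have h3 := ihi i' (by omega) j' (pvF La Lb (i'+1) j' (pvF La Lb i' (j'+1) c).2).2 h2.2
              have hv : 1 + min (min (pvF La Lb i' (j'+1) c).1
                    (pvF La Lb (i'+1) j' (pvF La Lb i' (j'+1) c).2).1)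
                    (pvF La Lb i' j' (pvF La Lb (i'+1) j' (pvF La Lb i' (j'+1) c).2).2).1
                  = pvE La Lb (i'+1) (j'+1) := by
                rw [h1.1, h2.1, h3.1, pvE_succ_succ, if_neg hch]
                omega
              exact ⟨hv, pvInv_insert La Lb _ _ _ _ h3.2 hv⟩

-- ---------- A side ----------

theorem getD_set_self (tbl : List (List Int)) (i : Nat) (r : List Int) (h : i < tbl.length) :
    (tbl.set i r).getD i [] = r := by
  rw [List.getD_eq_getElem _ _ (by simpa using h)]
  simp

theorem getD_set_ne (tbl : List (List Int)) (i k : Nat) (r : List Int) (h : k ≠ i) :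
    (tbl.set i r).getD k [] = tbl.getD k [] := by
  rcases Nat.lt_or_ge k tbl.length with hk | hk
  · rw [List.getD_eq_getElem _ _ (by simpa using hk), List.getD_eq_getElem _ _ hk]
    simp [List.getElem_set_ne (h := Ne.symm h)]
  · rw [List.getD_eq_default _ _ (by simpa using hk), List.getD_eq_default _ _ hk]

theorem getD_int_set_self (r : List Int) (j : Nat) (v : Int) (h : j < r.length) :
    (r.set j v).getD j 0 = v := by
  rw [List.getD_eq_getElem _ _ (by simpa using h)]
  simp

theorem getD_int_set_ne (r : List Int) (j k : Nat) (v : Int) (h : k ≠ j) :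
    (r.set j v).getD k 0 = r.getD k 0 := by
  rcases Nat.lt_or_ge k r.length with hk | hk
  · rw [List.getD_eq_getElem _ _ (by simpa using hk), List.getD_eq_getElem _ _ hk]
    simp [List.getElem_set_ne (h := Ne.symm h)]
  · rw [List.getD_eq_default _ _ (by simpa using hk), List.getD_eq_default _ _ hk]

-- shape: lengths preserved by pvSetCell
theorem pvSetCell_shape (tbl : List (List Int)) (i j : Nat) (v : Int) (n m : Nat)
    (h1 : tbl.length = n + 1) (h2 : ∀ k, k < n + 1 → (tbl.getD k []).length = m + 1) :
    (pvSetCell tbl i j v).length = n + 1 ∧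
    ∀ k, k < n + 1 → ((pvSetCell tbl i j v).getD k []).length = m + 1 := by
  constructor
  · simp [pvSetCell, h1]
  · intro k hk
    by_cases hki : k = i
    · subst hki
      rw [pvSetCell, getD_set_self _ _ _ (by omega), List.length_set]
      exact h2 k hk
    · rw [pvSetCell, getD_set_ne _ _ _ _ hki]
      exact h2 k hk

-- the inner j-loop of A fills row i with pvE i values and leaves other rows alone
theorem A_inner (La Lb : List Char) (n m i : Nat) (_hn : La.length = n) (_hm : Lb.length = m)
    (hi : i < n + 1) :
    ∀ (t s : Nat) (tbl : List (List Int)), s + t = m + 1 →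
      tbl.length = n + 1 → (∀ k, k < n + 1 → (tbl.getD k []).length = m + 1) →
      (∀ j, j < s → pvGetCell tbl i j = pvE La Lb i j) →
      (∀ j, j < m + 1 → i ≠ 0 → pvGetCell tbl (i-1) j = pvE La Lb (i-1) j) →
      (let res := (List.range' s t).foldl (pvInner La Lb i) tbl
       res.length = n + 1 ∧ (∀ k, k < n + 1 → (res.getD k []).length = m + 1) ∧
       (∀ k, k ≠ i → res.getD k [] = tbl.getD k []) ∧
       (∀ j, j < s + t → pvGetCell res i j = pvE La Lb i j)) := by
  intro t
  induction t with
  | zero =>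
    intro s tbl hst h1 h2 hrow _
    refine ⟨h1, h2, fun k _ => rfl, ?_⟩
    intro j hj
    exact hrow j (by omega)
  | succ t ih =>
    intro s tbl hst h1 h2 hrow hprev
    rw [List.range'_succ, List.foldl_cons]
    -- the value written at position (i, s)
    have hshape := fun v => pvSetCell_shape tbl i s v n m h1 h2
    have hrows : ∀ v k, k ≠ i → (pvSetCell tbl i s v).getD k [] = tbl.getD k [] := by
      intro v k hk
      rw [pvSetCell, getD_set_ne _ _ _ _ hk]
    have hcell : ∀ v j, j < s → pvGetCell (pvSetCell tbl i s v) i j = pvGetCell tbl i j := by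
      intro v j hj
      rw [pvGetCell, pvSetCell, getD_set_self _ _ _ (by omega),
          getD_int_set_ne _ _ _ _ (by omega)]
      rfl
    have hcellnew : ∀ v, pvGetCell (pvSetCell tbl i s v) i s = v := by
      intro v
      rw [pvGetCell, pvSetCell, getD_set_self _ _ _ (by omega),
          getD_int_set_self _ _ _ (by rw [h2 i hi]; omega)]
    have hval : ∃ v, pvInner La Lb i tbl s = pvSetCell tbl i s v ∧ v = pvE La Lb i s := by
      rcases Nat.eq_zero_or_pos i with hi0 | hi0
      · subst hi0
        exact ⟨(s : Int), by simp [pvInner], by rw [pvE_zero]⟩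
      · obtain ⟨i', rfl⟩ : ∃ i', i = i' + 1 := ⟨i - 1, by omega⟩
        rcases Nat.eq_zero_or_pos s with hs0 | hs0
        · subst hs0
          exact ⟨0, by simp [pvInner], by rw [pvE_succ_zero]⟩
        · obtain ⟨s', rfl⟩ : ∃ s', s = s' + 1 := ⟨s - 1, by omega⟩
          have hp1 : pvGetCell tbl i' s' = pvE La Lb i' s' := hprev s' (by omega) (by omega)
          have hp2 : pvGetCell tbl i' (s'+1) = pvE La Lb i' (s'+1) := hprev (s'+1) (by omega) (by omega)
          have hc : pvGetCell tbl (i'+1) s' = pvE La Lb (i'+1) s' := hrow s' (by omega)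
          by_cases hch : La.getD i' ' ' = Lb.getD s' ' '
          · refine ⟨pvGetCell tbl i' s', ?_, ?_⟩
            · simp only [pvInner, if_neg (by omega : ¬ i' + 1 = 0), if_neg (by omega : ¬ s' + 1 = 0),
                Nat.add_sub_cancel, if_pos hch]
            · rw [hp1, pvE_succ_succ, if_pos hch]
          · refine ⟨min (min (pvGetCell tbl i' (s'+1)) (pvGetCell tbl (i'+1) s'))
                (pvGetCell tbl i' s') + 1, ?_, ?_⟩
            · simp only [pvInner, if_neg (by omega : ¬ i' + 1 = 0), if_neg (by omega : ¬ s' + 1 = 0),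
                Nat.add_sub_cancel, if_neg hch]
            · rw [hp1, hp2, hc, pvE_succ_succ, if_neg hch]
    obtain ⟨v, heq, hv⟩ := hval
    rw [heq]
    have hres := ih (s+1) (pvSetCell tbl i s v) (by omega) (hshape v).1 (hshape v).2
      (by
        intro j hj
        rcases Nat.lt_or_ge j s with hj' | hj'
        · rw [hcell v j hj']; exact hrow j hj'
        · have : j = s := by omega
          subst this
          rw [hcellnew v, hv])
      (by
        intro j hj hne
        rw [pvGetCell, hrows v (i-1) (by omega)]
        exact hprev j hj hne)
    refine ⟨hres.1, hres.2.1, ?_, by intro j hj; exact hres.2.2.2 j (by omega)⟩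
    intro k hk
    rw [hres.2.2.1 k hk, hrows v k hk]

-- the outer i-loop: rows 0..s-1 correct
theorem A_outer (La Lb : List Char) (n m : Nat) (hn : La.length = n) (hm : Lb.length = m) :
    ∀ (t s : Nat) (tbl : List (List Int)), s + t = n + 1 →
      tbl.length = n + 1 → (∀ k, k < n + 1 → (tbl.getD k []).length = m + 1) →
      (∀ i, i < s → ∀ j, j < m + 1 → pvGetCell tbl i j = pvE La Lb i j) →
      (let res := (List.range' s t).foldl
        (fun tb i => (List.range (m+1)).foldl (pvInner La Lb i) tb) tbl
       res.length = n + 1 ∧ (∀ k, k < n + 1 → (res.getD k []).length = m + 1) ∧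
       (∀ i, i < s + t → ∀ j, j < m + 1 → pvGetCell res i j = pvE La Lb i j)) := by
  intro t
  induction t with
  | zero =>
    intro s tbl hst h1 h2 hrows
    exact ⟨h1, h2, fun i hi j hj => hrows i (by omega) j hj⟩
  | succ t ih =>
    intro s tbl hst h1 h2 hrows
    rw [List.range'_succ, List.foldl_cons]
    have hinner := A_inner La Lb n m s hn hm (by omega) (m+1) 0 tbl (by omega) h1 h2
      (by intro j hj; omega)
      (by
        intro j hj hne
        exact hrows (s-1) (by omega) j hj)
    rw [← List.range_eq_range'] at hinner
    have hres := ih (s+1) _ (by omega) hinner.1 hinner.2.1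
      (by
        intro i hi j hj
        rcases Nat.lt_or_ge i s with hi' | hi'
        · rw [pvGetCell, hinner.2.2.1 i (by omega)]
          exact hrows i hi' j hj
        · have : i = s := by omega
          subst this
          exact hinner.2.2.2 j (by omega))
    exact ⟨hres.1, hres.2.1, by intro i hi j hj; exact hres.2.2 i (by omega) j hj⟩

-- ===== VERDICT (by name: the statement is the Claim_ definition above) =====
theorem edistance_substring_spec : Claim_equal_edistance_substring := by
  intro A B _
  unfold Spec_edistance_substring edistance_substring edistance_substring_alt
  set La := A.toList with hLa
  set Lb := B.toList with hLb
  set n := La.length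
  set m := Lb.length
  simp only []
  -- A side
  have htbl0len : (List.replicate (n+1) (List.replicate (m+1) (0:Int))).length = n + 1 := by simp
  have htbl0rows : ∀ k, k < n + 1 →
      ((List.replicate (n+1) (List.replicate (m+1) (0:Int))).getD k []).length = m + 1 := by
    intro k hk
    rw [List.getD_eq_getElem _ _ (by simpa using hk)]
    simp
  have hA := A_outer La Lb n m rfl rfl (n+1) 0
    (List.replicate (n+1) (List.replicate (m+1) (0:Int))) (by omega) htbl0len htbl0rows
    (by intro i hi; omega)
  rw [show List.range (n+1) = List.range' 0 (n+1) by rw [List.range_eq_range']]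
  set res := (List.range' 0 (n+1)).foldl
    (fun tb i => (List.range (m+1)).foldl (pvInner La Lb i) tb)
    (List.replicate (n+1) (List.replicate (m+1) (0:Int))) with hres
  have hAval : (res.getD (res.length - 1) []).getD ((res.getD (res.length - 1) []).length - 1) 0
      = pvE La Lb n m := by
    rw [hA.1]
    have hlast : (res.getD n []).length = m + 1 := hA.2.1 n (by omega)
    rw [Nat.add_sub_cancel, hlast, Nat.add_sub_cancel]
    exact hA.2.2 n (by omega) m (by omega)
  rw [hAval]
  -- B side
  exact ((pvF_spec La Lb n m PySem.Dict.empty (pvInv_empty La Lb)).1).symm
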